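-- pv_equiv track=rewrite | github.com/hlajungo/online_judge_python3 | itsa/平面魔方.py | gen_square_2d
-- ===== SOURCE A (Python) =====
-- def gen_square_2d(s, len1):
--     list_2d = []
--     for i in range(len1):
--         list_1d = []
--         for j in range(s, s + len1):
--             list_1d.append(i*len1 + j)
--         list_2d.append(list_1d)
--     return list_2d
-- ===== SOURCE B (Python) =====
-- def gen_square_2d(s, len1):
--     flat = range(s, s + len1 * len1)
--     return [list(flat[i * len1:(i + 1) * len1]) for i in range(len1)]
-- ===== Notes on version B (the rewrite author's own statement) =====
-- stated objective: simpler
-- what changed: Treats the grid's values as one flat contiguous range(s, s + len1*len1) and reshapes it into rows by slicing that range, instead of computing each cell i*len1+j in nested loops.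
import Mathlib
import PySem

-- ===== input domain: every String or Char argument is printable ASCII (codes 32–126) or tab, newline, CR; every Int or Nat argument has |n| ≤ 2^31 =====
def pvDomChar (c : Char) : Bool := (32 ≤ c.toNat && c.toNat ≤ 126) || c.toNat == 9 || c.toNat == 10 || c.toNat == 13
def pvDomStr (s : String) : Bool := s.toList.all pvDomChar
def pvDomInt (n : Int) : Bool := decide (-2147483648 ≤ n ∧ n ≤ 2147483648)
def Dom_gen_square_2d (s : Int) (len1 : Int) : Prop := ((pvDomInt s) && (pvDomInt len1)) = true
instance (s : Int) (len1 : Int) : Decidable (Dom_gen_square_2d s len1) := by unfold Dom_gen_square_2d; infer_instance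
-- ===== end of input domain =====

-- B builds the grid's values as one flat contiguous range and reshapes it into rows by slicing (simpler decomposition; return values proved equal).

-- ===== PORT A =====
def gen_square_2d (s : Int) (len1 : Int) : List (List Int) :=
  (PySem.List.pyRange 0 len1 1).foldl
    (fun list_2d i =>
      list_2d ++ [(PySem.List.pyRange s (s + len1) 1).foldl
        (fun list_1d j => list_1d ++ [i * len1 + j]) []])
    []

-- ===== PORT B =====
-- flat = range(s, s + len1*len1) is a lazy range object; flat[a:b] is itself a range.
-- Here every slice taken has 0 <= i*len1 <= (i+1)*len1 <= len1*len1 (since i in range(len1)),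
-- so the slice's clamping never acts and list(flat[i*len1:(i+1)*len1]) is exactly
-- range(s + i*len1, s + (i+1)*len1): ported as that pyRange (exact on every reached i).
def gen_square_2d_alt (s : Int) (len1 : Int) : List (List Int) :=
  (PySem.List.pyRange 0 len1 1).map
    (fun i => PySem.List.pyRange (s + i * len1) (s + (i + 1) * len1) 1)

-- ===== PRECONDITION & SPEC =====
def Spec_gen_square_2d (s : Int) (len1 : Int) (out : List (List Int)) : Prop := out = gen_square_2d_alt s len1
instance (s : Int) (len1 : Int) (out : List (List Int)) : Decidable (Spec_gen_square_2d s len1 out) := by unfold Spec_gen_square_2d; infer_instance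

-- ===== CLAIM (what is proved, stated in full; the proofs are below) =====
def Claim_equal_gen_square_2d : Prop := ∀ (s : Int) (len1 : Int), Dom_gen_square_2d s len1 → Spec_gen_square_2d s len1 (gen_square_2d s len1)

-- ===== LEMMAS AND PROOFS =====

-- Row i of B (the sliced flat range) is row i of A (the inner loop's list).
theorem pv_row_eq (s len1 i : Int) :
    PySem.List.pyRange (s + i * len1) (s + (i + 1) * len1) 1
    = (PySem.List.pyRange s (s + len1) 1).map (fun j => i * len1 + j) := by
  rw [PySem.List.pyRange_one, PySem.List.pyRange_one,
    show s + (i + 1) * len1 - (s + i * len1) = len1 by ring,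
    show s + len1 - s = len1 by ring]
  simp only [List.map_map]
  exact List.map_congr_left (fun k _ => by simp only [Function.comp]; ring)

-- ===== VERDICT (by name: the statement is the Claim_ definition above) =====
theorem gen_square_2d_spec : Claim_equal_gen_square_2d := by
  intro s len1 _
  unfold Spec_gen_square_2d gen_square_2d gen_square_2d_alt
  rw [PySem.List.foldl_append_singleton_eq_map]
  refine (List.map_congr_left ?_)
  intro i hi
  rw [pv_row_eq s len1 i, PySem.List.foldl_append_singleton_eq_map]
  simp
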